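-- pv_equiv track=rewrite | github.com/Phy-Hub/phy-hub.github.io | topics/special-relativity/Latex/safe/variable_finder.py | mask_comments
-- ===== SOURCE A (Python) =====
-- def mask_comments(text):
--     """
--     Replaces comments with spaces, preserving indices.
--     """
--     lines = text.split('\n')
--     masked_lines = []
--     for line in lines:
--         idx = -1
--         is_escaped = False
--         for i, char in enumerate(line):
--             if char == '\\':
--                 is_escaped = not is_escaped
--             elif char == '%':
--                 if not is_escaped:
--                     idx = i
--                     break
--                 is_escaped = False
--             else:
--                 is_escaped = False
--
--         if idx != -1:
--             line = line[:idx] + ' ' * (len(line) - idx)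
--         masked_lines.append(line)
--     return '\n'.join(masked_lines)
-- ===== SOURCE B (Python) =====
-- def mask_comments(text):
--     """
--     Replaces comments with spaces, preserving indices.
--     Single pass over the whole string: no line splitting/joining, a
--     comment flag that a newline resets, and backslash-run parity.
--     """
--     out = []
--     in_comment = False
--     is_escaped = False
--     for ch in text:
--         if ch == '\n':
--             out.append('\n')
--             in_comment = False
--             is_escaped = False
--         elif in_comment:
--             out.append(' ')
--         elif ch == '\\':
--             out.append('\\')
--             is_escaped = not is_escaped
--         elif ch == '%' and not is_escaped:
--             out.append(' ')
--             in_comment = True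
--         else:
--             out.append(ch)
--             is_escaped = False
--     return ''.join(out)
-- ===== Notes on version B (the rewrite author's own statement) =====
-- stated objective: alternative
-- what changed: Replaces A's split(' ') / per-line escape-scan-then-slice-and-pad / join pipeline by a single pass over the whole string with an in_comment flag that a newline resets, emitting each output character directly.
import Mathlib
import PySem

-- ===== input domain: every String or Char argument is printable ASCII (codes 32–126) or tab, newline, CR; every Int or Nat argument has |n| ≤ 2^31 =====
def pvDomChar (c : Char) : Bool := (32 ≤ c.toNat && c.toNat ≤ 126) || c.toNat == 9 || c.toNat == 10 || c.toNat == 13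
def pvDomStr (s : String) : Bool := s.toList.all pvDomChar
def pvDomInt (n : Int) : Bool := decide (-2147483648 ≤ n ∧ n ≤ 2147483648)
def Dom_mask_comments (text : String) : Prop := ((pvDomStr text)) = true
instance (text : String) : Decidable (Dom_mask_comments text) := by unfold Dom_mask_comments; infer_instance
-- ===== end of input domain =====

-- B replaces A's split-mask-join over lines by one pass over the whole string
-- with a comment flag that a newline resets (objective: alternative, same cost).

-- ===== PORT A =====
-- the inner 'for i, char in enumerate(line)' loop with its break:
-- returns the index of the first unescaped '%' (Python's idx, none = idx stays -1)
def pvAScan : List Char → Bool → Nat → Option Nat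
  | [], _, _ => none
  | c :: rest, esc, i =>
    if c = '\\' then pvAScan rest (!esc) (i + 1)
    else if c = '%' then
      (if !esc then some i else pvAScan rest false (i + 1))
    else pvAScan rest false (i + 1)

-- the body of A's outer loop: mask one line
def pvAMaskLine (line : List Char) : List Char :=
  match pvAScan line false 0 with
  | none => line
  | some idx =>
      PySem.Chars.slice line none (some (idx : Int)) ++
        PySem.List.pyRepeat [' '] ((line.length : Int) - (idx : Int))

def mask_comments (text : String) : String :=
  String.ofList (PySem.Chars.join ['\n']
    ((PySem.Chars.splitOn text.toList ['\n']).map pvAMaskLine))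

-- ===== PORT B =====
-- Source B's single loop; state = (in_comment, is_escaped)
def pvBGo : List Char → Bool → Bool → List Char
  | [], _, _ => []
  | c :: rest, inC, esc =>
    if c = '\n' then '\n' :: pvBGo rest false false
    else if inC then ' ' :: pvBGo rest inC esc
    else if c = '\\' then '\\' :: pvBGo rest false (!esc)
    else if c = '%' && !esc then ' ' :: pvBGo rest true esc
    else c :: pvBGo rest false false

def mask_comments_alt (text : String) : String :=
  String.ofList (pvBGo text.toList false false)

-- ===== PRECONDITION & SPEC =====
def Spec_mask_comments (text : String) (out : String) : Prop := out = mask_comments_alt text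
instance (text : String) (out : String) : Decidable (Spec_mask_comments text out) := by unfold Spec_mask_comments; infer_instance

-- ===== CLAIM (what is proved, stated in full; the proofs are below) =====
def Claim_equal_mask_comments : Prop := ∀ (text : String), Dom_mask_comments text → Spec_mask_comments text (mask_comments text)

-- ===== LEMMAS AND PROOFS =====

-- reference splitter: split on '\n', accumulating the current line in order
def pvSplitNl (pre : List Char) : List Char → List (List Char)
  | [] => [pre]
  | c :: rest => if c = '\n' then pre :: pvSplitNl [] rest else pvSplitNl (pre ++ [c]) rest

theorem pvSplitNl_ne_nil (cs pre : List Char) : pvSplitNl pre cs ≠ [] := by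
  induction cs generalizing pre with
  | nil => simp [pvSplitNl]
  | cons c rest ih => simp only [pvSplitNl]; split <;> simp [ih]

theorem pv_go_eq_splitNl (fuel : Nat) (l cur : List Char) (acc : List (List Char))
    (h : l.length < fuel) :
    PySem.Chars.splitOn.go ['\n'] fuel l cur acc = acc.reverse ++ pvSplitNl cur.reverse l := by
  induction fuel generalizing l cur acc with
  | zero => omega
  | succ fuel ih =>
    cases l with
    | nil => simp [PySem.Chars.splitOn.go, pvSplitNl]
    | cons c rest =>
      by_cases hc : c = '\n'
      · subst hc
        have hp : List.isPrefixOf ['\n'] ('\n' :: rest) = true := by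
          simp [List.isPrefixOf]
        simp only [PySem.Chars.splitOn.go, hp, if_pos]
        rw [ih _ _ _ (by simp at h ⊢; omega)]
        simp [pvSplitNl]
      · have hp : List.isPrefixOf ['\n'] (c :: rest) = false := by
          simp [List.isPrefixOf]; exact fun hh => hc hh.symm
        simp only [PySem.Chars.splitOn.go, hp, Bool.false_eq_true, if_neg, not_false_iff]
        rw [ih _ _ _ (by simp at h ⊢; omega)]
        simp [pvSplitNl, hc]

theorem pv_splitOn_eq (cs : List Char) :
    PySem.Chars.splitOn cs ['\n'] = pvSplitNl [] cs := by
  show PySem.Chars.splitOn.go ['\n'] (cs.length + 1) cs [] [] = _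
  rw [pv_go_eq_splitNl _ _ _ _ (by omega)]; rfl

theorem pvSplitNl_no_nl (cs pre : List Char) (h : '\n' ∉ cs) :
    pvSplitNl pre cs = [pre ++ cs] := by
  induction cs generalizing pre with
  | nil => simp [pvSplitNl]
  | cons c rest ih =>
    simp only [List.mem_cons, not_or] at h
    simp [pvSplitNl, Ne.symm h.1, ih _ h.2]

theorem pvSplitNl_append (l rest pre : List Char) (h : '\n' ∉ l) :
    pvSplitNl pre (l ++ '\n' :: rest) = (pre ++ l) :: pvSplitNl [] rest := by
  induction l generalizing pre with
  | nil => simp [pvSplitNl]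
  | cons c t ih =>
    simp only [List.mem_cons, not_or] at h
    simp [pvSplitNl, Ne.symm h.1, ih _ h.2]

-- pvAScan with start index i is pvAScan from 0, shifted
theorem pvAScan_shift (l : List Char) (esc : Bool) (i : Nat) :
    pvAScan l esc i = (pvAScan l esc 0).map (· + i) := by
  induction l generalizing esc i with
  | nil => simp [pvAScan]
  | cons c rest ih =>
    simp only [pvAScan]
    split
    · rw [ih, ih (!esc) 1]; cases pvAScan rest (!esc) 0 <;> simp <;> omega
    · split
      · split <;> simp
        · rw [ih, ih false 1]; cases pvAScan rest false 0 <;> simp <;> omega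
      · rw [ih, ih false 1]; cases pvAScan rest false 0 <;> simp <;> omega

-- comment mode: B emits spaces to end of line
theorem pvBGo_comment (l : List Char) (esc : Bool) (h : '\n' ∉ l) :
    pvBGo l true esc = List.replicate l.length ' ' := by
  induction l generalizing esc with
  | nil => simp [pvBGo]
  | cons c rest ih =>
    simp only [List.mem_cons, not_or] at h
    simp [pvBGo, Ne.symm h.1, List.replicate_succ, ih esc h.2]

-- within one line: B's scan equals A's idx-then-mask
theorem pvBGo_line (l : List Char) (esc : Bool) (h : '\n' ∉ l) :
    pvBGo l false esc =
      match pvAScan l esc 0 with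
      | none => l
      | some idx => l.take idx ++ List.replicate (l.length - idx) ' ' := by
  induction l generalizing esc with
  | nil => simp [pvBGo, pvAScan]
  | cons c rest ih =>
    simp only [List.mem_cons, not_or] at h
    obtain ⟨h1, h2⟩ := h
    have hc1 : ¬ c = '\n' := fun e => h1 e.symm
    by_cases hb : c = '\\'
    · subst hb
      rw [show pvBGo ('\\' :: rest) false esc = '\\' :: pvBGo rest false (!esc) by
            simp [pvBGo],
          show pvAScan ('\\' :: rest) esc 0 = pvAScan rest (!esc) 1 by simp [pvAScan],
          pvAScan_shift, ih (!esc) h2]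
      cases pvAScan rest (!esc) 0 with
      | none => simp
      | some j =>
        simp only [Option.map_some, List.length_cons, List.take_succ_cons,
          List.cons_append, List.cons.injEq, true_and, Nat.add_sub_add_right]
    · by_cases hpct : c = '%'
      · subst hpct
        cases esc with
        | false =>
          rw [show pvBGo ('%' :: rest) false false = ' ' :: pvBGo rest true false by
                simp [pvBGo],
              show pvAScan ('%' :: rest) false 0 = some 0 by simp [pvAScan],
              pvBGo_comment rest false h2]
          simp [List.replicate_succ]
        | true =>
          rw [show pvBGo ('%' :: rest) false true = '%' :: pvBGo rest false false by
                simp [pvBGo],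
              show pvAScan ('%' :: rest) true 0 = pvAScan rest false 1 by simp [pvAScan],
              pvAScan_shift, ih false h2]
          cases pvAScan rest false 0 with
          | none => simp
          | some j =>
            simp only [Option.map_some, List.length_cons, List.take_succ_cons,
              List.cons_append, List.cons.injEq, true_and, Nat.add_sub_add_right]
      · rw [show pvBGo (c :: rest) false esc = c :: pvBGo rest false false by
              simp [pvBGo, hc1, hb, hpct],
            show pvAScan (c :: rest) esc 0 = pvAScan rest false 1 by
              simp [pvAScan, hb, hpct],
            pvAScan_shift, ih false h2]
        cases pvAScan rest false 0 with
        | none => simp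
        | some j =>
          simp only [Option.map_some, List.length_cons, List.take_succ_cons,
            List.cons_append, List.cons.injEq, true_and, Nat.add_sub_add_right]

-- A's line mask, rewritten with take/replicate
theorem pvAMaskLine_eq (l : List Char) :
    pvAMaskLine l =
      match pvAScan l false 0 with
      | none => l
      | some idx => l.take idx ++ List.replicate (l.length - idx) ' ' := by
  unfold pvAMaskLine
  cases pvAScan l false 0 with
  | none => rfl
  | some idx =>
    simp only [PySem.Chars.slice_eq_listSlice, PySem.List.slice_to_natCast,
      PySem.List.pyRepeat_singleton]
    congr 2
    omega

-- first-newline decomposition of a list containing '\n'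
theorem pv_exists_split (cs : List Char) (h : '\n' ∈ cs) :
    ∃ l rest, '\n' ∉ l ∧ cs = l ++ '\n' :: rest ∧ rest.length < cs.length := by
  induction cs with
  | nil => cases h
  | cons c t ih =>
    by_cases hc : c = '\n'
    · exact ⟨[], t, by simp, by simp [hc], by simp⟩
    · have ht : '\n' ∈ t := by
        rcases List.mem_cons.mp h with h' | h'
        · exact absurd h'.symm hc
        · exact h'
      obtain ⟨l, rest, h1, h2, h3⟩ := ih ht
      refine ⟨c :: l, rest, ?_, by simp [h2], by simp; omega⟩
      simp only [List.mem_cons, not_or]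
      exact ⟨fun e => hc e.symm, h1⟩

-- B factors across the first newline
theorem pvBGo_factor (l rest : List Char) (inC esc : Bool) (h : '\n' ∉ l) :
    pvBGo (l ++ '\n' :: rest) inC esc = pvBGo l inC esc ++ '\n' :: pvBGo rest false false := by
  induction l generalizing inC esc with
  | nil => simp [pvBGo]
  | cons c t ih =>
    simp only [List.mem_cons, not_or] at h
    simp only [List.cons_append, pvBGo, if_neg (Ne.symm h.1)]
    split
    · rw [ih _ _ h.2]; rfl
    · split
      · rw [ih _ _ h.2]; rfl
      · split
        · rw [ih _ _ h.2]; rfl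
        · rw [ih _ _ h.2]; rfl

-- main: B's single pass = join of A's per-line masks
theorem pv_main (cs : List Char) :
    pvBGo cs false false =
      PySem.Chars.join ['\n'] ((pvSplitNl [] cs).map pvAMaskLine) := by
  by_cases hnl : '\n' ∈ cs
  · obtain ⟨l, rest, hl, hsplit, hlen⟩ := pv_exists_split cs hnl
    subst hsplit
    rw [pvBGo_factor _ _ _ _ hl, pvSplitNl_append _ _ _ hl]
    have ihrest := pv_main rest
    rw [ihrest, pvBGo_line _ _ hl, ← pvAMaskLine_eq]
    simp only [List.nil_append, List.map_cons]
    cases hmap : (pvSplitNl [] rest).map pvAMaskLine with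
    | nil => exact absurd (List.map_eq_nil_iff.mp hmap) (pvSplitNl_ne_nil _ _)
    | cons b t =>
      simp [PySem.Chars.join, List.intercalate, List.intersperse]
  · rw [pvSplitNl_no_nl _ _ hnl, pvBGo_line _ _ hnl, ← pvAMaskLine_eq]
    simp [PySem.Chars.join, List.intercalate]
termination_by cs.length
decreasing_by omega

-- ===== VERDICT (by name: the statement is the Claim_ definition above) =====
theorem mask_comments_spec : Claim_equal_mask_comments := by
  intro text _
  unfold Spec_mask_comments mask_comments mask_comments_alt
  rw [pv_splitOn_eq, ← pv_main]
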